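-- pv_equiv track=rewrite | github.com/INF-1007/tp2-l03-10 | exercice5.py | categoriser_rapports
-- ===== SOURCE A (Python) =====
-- def analyser_rapport(texte, mots_cles):
--     """
--     Calcule le score d’un rapport et extrait les mots-clés détectés.
--
--     Étapes attendues :
--     1) Mettre le texte en minuscules
--     2) Compter les occurrences de chaque mot-clé
--        (approche simple autorisée : split() + comparaison de mots)
--     3) score = 5 + somme(occurrences * score_mot)
--     4) borner score entre 0 et 10
--     5) retourner (score, liste_mots_trouves_sans_doublons)
--
--     Args:
--         texte (str)
--         mots_cles (dict): {mot: score_int}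
--
--     Returns:
--         tuple: (score_int, mots_trouves_list)
--     """
--     score = 5
--     mots_trouves = []
--
--     # TODO 1 : normaliser texte (minuscules)
--     # TODO 2 : découper en mots. Attention aussi à enlever la ponctuation basique aux extrémités (utiliser la fonction strip())S.
--     # TODO 3 : pour chaque mot-clé :
--     #    - mettre à jour le score
--     #    - si occurrences > 0 : ajouter le mot à mots_trouves (sans doublons)
--     # TODO 4 : borner score entre 0 et 10 (min/max)
--     # TODO 5 : retourner (score, mots_trouves)
--     texte = texte.lower()
--     words = texte.split()
--     words = [word.strip(" .,?!'\":;><()[]") for word in words]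
--     found_words = {}
--     for word in words:
--         if word in mots_cles:
--             score += mots_cles[word]
--             if word in found_words:
--                 found_words[word] += 1
--             else:
--                 found_words[word] = 1
--     for word in found_words:
--         mots_trouves.append(word)
--     if score > 10: score = 10
--     elif score < 0: score = 0
--     return score, mots_trouves
--
-- def categoriser_rapports(rapports, mots_cles):
--     """
--     Classe les rapports en 3 catégories selon leur score :
--
--     - 'positifs' : score >= 7
--     - 'neutres'  : 4 <= score <= 6
--     - 'negatifs' : score <= 3
--
--     Args:
--         rapports (list): liste de chaînes
--         mots_cles (dict)
--
--     Returns: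
--         dict: {
--             'positifs': [(texte, score), ...],
--             'neutres':  [(texte, score), ...],
--             'negatifs': [(texte, score), ...]
--         }
--     """
--     categories = {'positifs': [], 'neutres': [], 'negatifs': []}
--
--     # TODO :
--     # Pour chaque texte :
--     #   - faire une analyse du rapport pour en tirer le score
--     #   - mettre à jour "categories"
--     if rapports == []:
--         return categories
--     else:
--         for report in rapports:
--             score = analyser_rapport(report, mots_cles)[0]
--             if score >= 7: categories['positifs'].append((report, score))
--             elif score >= 4 and score <= 6: categories["neutres"].append((report, score))
--             else: categories['negatifs'].append((report, score))
--     return categories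
-- ===== SOURCE B (Python) =====
-- def _score(report, mots_cles):
--     words = [w.strip(" .,?!'\":;><()[]") for w in report.lower().split()]
--     return max(0, min(10, 5 + sum(v * words.count(k) for k, v in mots_cles.items())))
--
-- def categoriser_rapports(rapports, mots_cles):
--     scored = [(r, _score(r, mots_cles)) for r in rapports]
--     return {'positifs': [p for p in scored if p[1] >= 7],
--             'neutres': [p for p in scored if 4 <= p[1] <= 6],
--             'negatifs': [p for p in scored if p[1] <= 3]}
-- ===== Notes on version B (the rewrite author's own statement) =====
-- stated objective: alternative
-- what changed: B is keyword-major and staged: per report it counts each keyword's occurrences in the cleaned word list (v * words.count(k)) instead of scanning word occurrences against the dict with a found_words tally, then buckets in a second stage by three filters over a scored list instead of appending into a dict of lists during the scan.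
import Mathlib
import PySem

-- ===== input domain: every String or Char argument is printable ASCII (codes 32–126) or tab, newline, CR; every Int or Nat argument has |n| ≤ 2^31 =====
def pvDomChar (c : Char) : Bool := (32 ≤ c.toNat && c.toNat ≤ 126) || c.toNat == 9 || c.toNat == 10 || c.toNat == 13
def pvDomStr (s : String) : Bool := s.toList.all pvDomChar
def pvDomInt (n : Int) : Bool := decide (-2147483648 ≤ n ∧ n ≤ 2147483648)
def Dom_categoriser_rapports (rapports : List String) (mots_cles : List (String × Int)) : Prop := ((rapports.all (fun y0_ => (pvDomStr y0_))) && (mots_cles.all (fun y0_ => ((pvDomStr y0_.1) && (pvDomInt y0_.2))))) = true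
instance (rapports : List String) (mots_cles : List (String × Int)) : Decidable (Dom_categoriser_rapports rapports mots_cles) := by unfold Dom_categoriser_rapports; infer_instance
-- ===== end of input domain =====

-- B scores keyword-major (for each keyword, v * words.count(k)) and buckets in a second stage by
-- three filters over a scored list, instead of A's word-scan with a found_words tally and in-loop
-- appends into a dict of lists; same results ("alternative": different decomposition, same cost class).


-- ===== PORT A =====
-- mots_cles is a Python dict built from the association list (overwrite semantics, as Python's dict)
def pvKwDict (mots_cles : List (String × Int)) : PySem.Dict String Int :=
  PySem.Dict.ofList mots_cles

def pvStripSet : String := " .,?!'\":;><()[]"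

def analyser_rapport (texte : String) (mots_cles : List (String × Int)) : Int × List String :=
  let texte := PySem.Str.lower texte
  let words := PySem.Str.split₀ texte
  let words := words.map (fun w => PySem.Str.stripChars w pvStripSet)
  let st := words.foldl (fun (st : Int × PySem.Dict String Int) word =>
      match (pvKwDict mots_cles).get? word with
      | some v =>
          (st.1 + v,
           if st.2.contains word then st.2.modify word 0 (· + 1) else st.2.insert word 1)
      | none => st) (5, PySem.Dict.empty)
  let mots_trouves := st.2.items.map (·.1)
  let score := if st.1 > 10 then 10 else if st.1 < 0 then 0 else st.1
  (score, mots_trouves)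

def categoriser_rapports (rapports : List String) (mots_cles : List (String × Int)) : List (String × List (String × Int)) :=
  let categories : PySem.Dict String (List (String × Int)) :=
    PySem.Dict.mk [("positifs", []), ("neutres", []), ("negatifs", [])]
  if rapports = [] then categories.items
  else
    (rapports.foldl (fun cat report =>
        let score := (analyser_rapport report mots_cles).1
        if score ≥ 7 then cat.modify "positifs" [] (· ++ [(report, score)])
        else if score ≥ 4 ∧ score ≤ 6 then cat.modify "neutres" [] (· ++ [(report, score)])
        else cat.modify "negatifs" [] (· ++ [(report, score)])) categories).items

-- ===== PORT B =====
-- helper _score of Source B: keyword-major scoring, v * words.count(k) per dict item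
def pvScore (report : String) (mots_cles : List (String × Int)) : Int :=
  let words := (PySem.Str.split₀ (PySem.Str.lower report)).map
      (fun w => PySem.Str.stripChars w pvStripSet)
  max 0 (min 10 (5 + ((pvKwDict mots_cles).items.map
      (fun p => p.2 * (words.count p.1 : Int))).sum))

def categoriser_rapports_alt (rapports : List String) (mots_cles : List (String × Int)) : List (String × List (String × Int)) :=
  let scored := rapports.map (fun r => (r, pvScore r mots_cles))
  [("positifs", scored.filter (fun p => decide (p.2 ≥ 7))),
   ("neutres",  scored.filter (fun p => decide (4 ≤ p.2 ∧ p.2 ≤ 6))),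
   ("negatifs", scored.filter (fun p => decide (p.2 ≤ 3)))]

-- ===== PRECONDITION & SPEC =====
def Spec_categoriser_rapports (rapports : List String) (mots_cles : List (String × Int)) (out : List (String × List (String × Int))) : Prop := out = categoriser_rapports_alt rapports mots_cles
instance (rapports : List String) (mots_cles : List (String × Int)) (out : List (String × List (String × Int))) : Decidable (Spec_categoriser_rapports rapports mots_cles out) := by unfold Spec_categoriser_rapports; infer_instance

-- ===== CLAIM (what is proved, stated in full; the proofs are below) =====
def Claim_equal_categoriser_rapports : Prop := ∀ (rapports : List String) (mots_cles : List (String × Int)), Dom_categoriser_rapports rapports mots_cles → Spec_categoriser_rapports rapports mots_cles (categoriser_rapports rapports mots_cles)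

-- ===== LEMMAS AND PROOFS =====

-- weight of one word occurrence: the keyword score, 0 when not a keyword
def pvW (mots_cles : List (String × Int)) (w : String) : Int :=
  ((pvKwDict mots_cles).get? w).getD 0

-- A's scoring loop: the first component is 5 + sum of weights over all word occurrences
theorem foldA_fst (kw : List (String × Int)) (ws : List String) (s : Int) (d : PySem.Dict String Int) :
    (ws.foldl (fun (st : Int × PySem.Dict String Int) word =>
      match (pvKwDict kw).get? word with
      | some v =>
          (st.1 + v,
           if st.2.contains word then st.2.modify word 0 (· + 1) else st.2.insert word 1)
      | none => st) (s, d)).1 = s + (ws.map (pvW kw)).sum := by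
  induction ws generalizing s d with
  | nil => simp
  | cons w ws ih =>
    simp only [List.foldl_cons, List.map_cons, List.sum_cons]
    cases h : (pvKwDict kw).get? w with
    | none => rw [ih]; simp [pvW, h]
    | some v => rw [ih]; simp [pvW, h]; ring

-- over a nodup key list, the indicator-weighted sum at x is g x (g vanishing off the list)
theorem sum_indicator (keys : List String) (hk : keys.Nodup) (g : String → Int)
    (x : String) (hg : x ∉ keys → g x = 0) :
    (keys.map (fun k => g k * (if k = x then (1 : Int) else 0))).sum = g x := by
  induction keys with
  | nil => simp [hg (by simp)]
  | cons a ks ih =>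
    rcases List.nodup_cons.mp hk with ⟨ha, hks⟩
    simp only [List.map_cons, List.sum_cons]
    by_cases hax : a = x
    · subst hax
      have : ∀ k ∈ ks, g k * (if k = a then (1 : Int) else 0) = 0 := by
        intro k hkmem
        have : k ≠ a := fun h => ha (h ▸ hkmem)
        simp [this]
      rw [List.map_congr_left this]
      simp
    · rw [if_neg hax, ih hks (fun hx => hg (by simp [hx, Ne.symm hax]))]
      ring

-- keyword-major sum  = occurrence-major sum (the exchange of traversal orders)
theorem exchange (keys : List String) (hk : keys.Nodup) (g : String → Int)
    (hg : ∀ w, w ∉ keys → g w = 0) (ws : List String) :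
    (keys.map (fun k => g k * (ws.count k : Int))).sum = (ws.map g).sum := by
  induction ws with
  | nil => simp
  | cons x t ih =>
    simp only [List.map_cons, List.sum_cons]
    have hcount : ∀ k, ((x :: t).count k : Int) = (t.count k : Int) + (if k = x then 1 else 0) := by
      intro k
      by_cases h : k = x
      · subst h; simp
      · simp [h, Ne.symm h]
    have hsplit : (keys.map (fun k => g k * ((x :: t).count k : Int))).sum
        = (keys.map (fun k => g k * (t.count k : Int))).sum
          + (keys.map (fun k => g k * (if k = x then (1 : Int) else 0))).sum := by
      rw [← List.sum_map_add]
      apply congrArg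
      apply List.map_congr_left
      intro k _
      rw [hcount k]; ring
    rw [hsplit, ih, sum_indicator keys hk g x (hg x)]
    ring

-- B's per-item sum equals the per-occurrence weight sum
theorem itemsum_eq (kw : List (String × Int)) (ws : List String) :
    ((pvKwDict kw).items.map (fun p => p.2 * (ws.count p.1 : Int))).sum
      = (ws.map (pvW kw)).sum := by
  have hnd : (pvKwDict kw).keys.Nodup := PySem.Dict.nodup_keys_ofList kw
  have hitems : (pvKwDict kw).items
      = (pvKwDict kw).keys.map (fun k => (k, (pvKwDict kw).getD k 0)) :=
    PySem.Dict.items_eq_map_keys _ hnd 0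
  rw [hitems, List.map_map]
  have h1 : ((fun p : String × Int => p.2 * (ws.count p.1 : Int)) ∘
      fun k => (k, (pvKwDict kw).getD k 0))
      = fun k => pvW kw k * (ws.count k : Int) := by
    funext k
    simp [pvW, PySem.Dict.getD_eq_get?_getD]
  rw [h1]
  apply exchange _ hnd
  intro w hw
  have hn : (pvKwDict kw).get? w = none := (PySem.Dict.get?_eq_none_iff_not_mem_keys _ _).mpr hw
  simp [pvW, hn]

-- the two per-report scores agree
theorem score_eq (r : String) (kw : List (String × Int)) :
    (analyser_rapport r kw).1 = pvScore r kw := by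
  unfold analyser_rapport pvScore
  simp only []
  rw [foldA_fst, itemsum_eq]
  generalize ((((PySem.Str.split₀ (PySem.Str.lower r)).map
      (fun w => PySem.Str.stripChars w pvStripSet)).map (pvW kw))).sum = S
  omega

-- clamping bounds
theorem clamp_bounds (s : Int) : 0 ≤ max 0 (min 10 s) ∧ max 0 (min 10 s) ≤ 10 := by omega

-- B's score is clamped
theorem score_bounds (r : String) (kw : List (String × Int)) :
    0 ≤ pvScore r kw ∧ pvScore r kw ≤ 10 := by
  unfold pvScore
  exact clamp_bounds _

-- literal 3-key dict: the three modifies, computed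
theorem mod_pos (p n g : List (String × Int)) (v : String × Int) :
    (PySem.Dict.mk [("positifs", p), ("neutres", n), ("negatifs", g)]).modify "positifs" [] (· ++ [v])
      = PySem.Dict.mk [("positifs", p ++ [v]), ("neutres", n), ("negatifs", g)] := by
  simp [PySem.Dict.modify, PySem.Dict.insert, PySem.Dict.contains, PySem.Dict.getD, PySem.Dict.get?]

theorem mod_neu (p n g : List (String × Int)) (v : String × Int) :
    (PySem.Dict.mk [("positifs", p), ("neutres", n), ("negatifs", g)]).modify "neutres" [] (· ++ [v])
      = PySem.Dict.mk [("positifs", p), ("neutres", n ++ [v]), ("negatifs", g)] := by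
  simp [PySem.Dict.modify, PySem.Dict.insert, PySem.Dict.contains, PySem.Dict.getD, PySem.Dict.get?]

theorem mod_neg (p n g : List (String × Int)) (v : String × Int) :
    (PySem.Dict.mk [("positifs", p), ("neutres", n), ("negatifs", g)]).modify "negatifs" [] (· ++ [v])
      = PySem.Dict.mk [("positifs", p), ("neutres", n), ("negatifs", g ++ [v])] := by
  simp [PySem.Dict.modify, PySem.Dict.insert, PySem.Dict.contains, PySem.Dict.getD, PySem.Dict.get?]

-- bucket invariant: A's dict fold produces exactly B's three filtered lists (appended to the state)
theorem buckets (kw : List (String × Int)) (rs : List String) (p n g : List (String × Int)) :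
    (rs.foldl (fun cat report =>
        let score := (analyser_rapport report kw).1
        if score ≥ 7 then cat.modify "positifs" [] (· ++ [(report, score)])
        else if score ≥ 4 ∧ score ≤ 6 then cat.modify "neutres" [] (· ++ [(report, score)])
        else cat.modify "negatifs" [] (· ++ [(report, score)]))
      (PySem.Dict.mk [("positifs", p), ("neutres", n), ("negatifs", g)])).items
    = [("positifs", p ++ (rs.map (fun r => (r, pvScore r kw))).filter (fun q => decide (q.2 ≥ 7))),
       ("neutres",  n ++ (rs.map (fun r => (r, pvScore r kw))).filter (fun q => decide (4 ≤ q.2 ∧ q.2 ≤ 6))),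
       ("negatifs", g ++ (rs.map (fun r => (r, pvScore r kw))).filter (fun q => decide (q.2 ≤ 3)))] := by
  induction rs generalizing p n g with
  | nil => simp
  | cons r rs ih =>
    simp only [List.foldl_cons, List.map_cons, List.filter_cons]
    have hs := score_eq r kw
    have hb := score_bounds r kw
    by_cases h7 : pvScore r kw ≥ 7
    · rw [if_pos (hs ▸ h7), hs, mod_pos, ih]
      have h2 : ¬((4 : Int) ≤ pvScore r kw ∧ pvScore r kw ≤ 6) := by omega
      have h3 : ¬(pvScore r kw ≤ (3 : Int)) := by omega
      simp [h7, h2, h3]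
    · rw [if_neg (fun h => h7 (hs ▸ h))]
      by_cases h4 : pvScore r kw ≥ 4
      · rw [if_pos (by rw [hs]; omega : (analyser_rapport r kw).1 ≥ 4 ∧ (analyser_rapport r kw).1 ≤ 6),
          hs, mod_neu, ih]
        have h2 : (4 : Int) ≤ pvScore r kw ∧ pvScore r kw ≤ 6 := ⟨h4, by omega⟩
        have h3 : ¬(pvScore r kw ≤ (3 : Int)) := by omega
        simp [h7, h2, h3]
      · rw [if_neg (by rw [hs]; omega), hs, mod_neg, ih]
        have h2 : ¬((4 : Int) ≤ pvScore r kw ∧ pvScore r kw ≤ 6) := by omega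
        have h3 : pvScore r kw ≤ (3 : Int) := by omega
        simp [h7, h2, h3]

-- ===== VERDICT (by name: the statement is the Claim_ definition above) =====
theorem categoriser_rapports_spec : Claim_equal_categoriser_rapports := by
  intro rapports mots_cles _
  show categoriser_rapports rapports mots_cles = categoriser_rapports_alt rapports mots_cles
  unfold categoriser_rapports categoriser_rapports_alt
  by_cases h : rapports = []
  · subst h; rfl
  · rw [if_neg h]
    rw [buckets mots_cles rapports [] [] []]
    simp
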